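-- pv_equiv track=rewrite | github.com/Ch3shireDev/Krzys-Matematyka | pajeczaki.py | stp
-- ===== SOURCE A (Python) =====
-- def stp(slowo):
--     tree = None
--     tab = []
--     for i in range(len(slowo)):
--         a = slowo[i]
--         element = []
--         if len(tab) == 0:
--             tree = element
--         else:
--             x = tab.pop()
--             x.append(element)
--         if a == 'J':
--             tab.append(element)
--         if a == 'D':
--             tab.append(element)
--             tab.append(element)
--         if a == 'T':
--             tab.append(element)
--             tab.append(element)
--             tab.append(element)
--     return depth(tree)
--
-- def depth(tab):
--     if len(tab) == 0:
--         return 1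
--     else:
--         return max([depth(x) for x in tab]) + 1
-- ===== SOURCE B (Python) =====
-- # B: same arena construction (aliasing via popped references), but depth is
-- # computed by an explicit-stack DFS carrying (node, level) pairs instead of
-- # recursion, and the build pushes via an arity table and list-extend.
-- def stp(slowo):
--     ARITY = {'J': 1, 'D': 2, 'T': 3}
--     tree = None
--     tab = []
--     for a in slowo:
--         element = []
--         if tab:
--             tab.pop().append(element)
--         else:
--             tree = element
--         tab.extend([element] * ARITY.get(a, 0))
--     result = 0
--     stack = [(tree, 1)]
--     while stack:
--         node, d = stack.pop()
--         if len(node) == 0: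
--             result = max(result, d)
--         else:
--             for child in node:
--                 stack.append((child, d + 1))
--     return result
-- ===== Notes on version B (the rewrite author's own statement) =====
-- stated objective: alternative
-- what changed: depth() is replaced by an explicit-stack DFS carrying (node, level) pairs with a running maximum instead of recursion over child lists, and the build loop pushes via an arity table and a single list-extend instead of three if-blocks.
import Mathlib
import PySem

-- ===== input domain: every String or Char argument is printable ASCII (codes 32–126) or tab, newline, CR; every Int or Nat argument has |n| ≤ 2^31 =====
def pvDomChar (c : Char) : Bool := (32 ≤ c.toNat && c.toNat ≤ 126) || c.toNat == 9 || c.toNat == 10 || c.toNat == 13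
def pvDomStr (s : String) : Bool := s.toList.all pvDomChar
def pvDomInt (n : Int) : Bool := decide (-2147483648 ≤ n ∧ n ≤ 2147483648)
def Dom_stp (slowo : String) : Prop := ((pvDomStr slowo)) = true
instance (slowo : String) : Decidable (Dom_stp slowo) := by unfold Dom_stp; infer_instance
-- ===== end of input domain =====

-- B changes only the shape of the code, not the cost: depth is an explicit-stack DFS
-- with a running maximum instead of recursion, and the build pushes via an arity table.
-- Python node objects are aliased mutable lists; both ports model them as an arena:
-- node = creation index, arena = list of children-index lists.

-- ===== PORT A =====
-- one loop iteration of A: create node, attach (or become tree), push per the 3 ifs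
def pvStepA (st : Option Nat × List Nat × List (List Nat)) (a : Char) :
    Option Nat × List Nat × List (List Nat) :=
  let tree := st.1
  let tab := st.2.1
  let arena := st.2.2
  let e := arena.length
  let (tree, tab, arena) :=
    match tab with
    | [] => (some e, ([] : List Nat), arena ++ [[]])
    | x :: rest => (tree, rest, arena.set x (arena.getD x [] ++ [e]) ++ [[]])
  let tab := if a = 'J' then e :: tab else tab
  let tab := if a = 'D' then e :: e :: tab else tab
  let tab := if a = 'T' then e :: e :: e :: tab else tab
  (tree, tab, arena)

-- A's recursive depth(); fuel is a totality guard only (recursion depth ≤ arena.length)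
def pvDepthA (arena : List (List Nat)) : Nat → Nat → Int
  | 0, _ => 0
  | fuel+1, i =>
    let cs := arena.getD i []
    if cs.length = 0 then 1
    else
      match cs.map (pvDepthA arena fuel) with
      | [] => 0   -- unreachable: cs ≠ []
      | h :: t => t.foldl max h + 1

def stp (slowo : String) : Int :=
  let st := slowo.toList.foldl pvStepA (none, [], [])
  match st.1 with
  | none => 0   -- Python: depth(None) raises TypeError; excluded by Pre_stp
  | some r => pvDepthA st.2.2 st.2.2.length r

-- ===== PORT B =====
def pvArity (a : Char) : Nat :=
  if a = 'J' then 1 else if a = 'D' then 2 else if a = 'T' then 3 else 0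

def pvStepB (st : Option Nat × List Nat × List (List Nat)) (a : Char) :
    Option Nat × List Nat × List (List Nat) :=
  let tree := st.1
  let tab := st.2.1
  let arena := st.2.2
  let e := arena.length
  match tab with
  | [] => (some e, List.replicate (pvArity a) e, arena ++ [[]])
  | x :: rest => (tree, List.replicate (pvArity a) e ++ rest,
      arena.set x (arena.getD x [] ++ [e]) ++ [[]])

-- number of nodes of the subtree at i; used only as DFS fuel (totality guard)
def pvSize (arena : List (List Nat)) : Nat → Nat → Nat
  | 0, _ => 1
  | fuel+1, i => 1 + ((arena.getD i []).map (pvSize arena fuel)).sum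

-- B's while loop: stack of (node, level), head = top of stack
def pvDfsB (arena : List (List Nat)) : Nat → List (Nat × Int) → Int → Int
  | 0, _, r => r
  | _+1, [], r => r
  | fuel+1, (i, d) :: s, r =>
    let cs := arena.getD i []
    if cs.length = 0 then pvDfsB arena fuel s (max r d)
    else pvDfsB arena fuel ((cs.map (fun c => (c, d + 1))).reverse ++ s) r

def stp_alt (slowo : String) : Int :=
  let st := slowo.toList.foldl pvStepB (none, [], [])
  match st.1 with
  | none => 0   -- Python: len(None) raises TypeError; excluded by Pre_stp
  | some r => pvDfsB st.2.2 (pvSize st.2.2 st.2.2.length r) [(r, 1)] 0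

-- ===== PRECONDITION & SPEC =====
-- Pre_ excludes only the empty word, on which Python A (and B) raise TypeError (depth of None).
def Pre_stp (slowo : String) : Prop := slowo ≠ ""
instance (slowo : String) : Decidable (Pre_stp slowo) := by unfold Pre_stp; infer_instance
def pvWitness_stp : String := "JDT"

def Spec_stp (slowo : String) (out : Int) : Prop := out = stp_alt slowo
instance (slowo : String) (out : Int) : Decidable (Spec_stp slowo out) := by unfold Spec_stp; infer_instance

-- ===== CLAIM (what is proved, stated in full; the proofs are below) =====
def Claim_equal_stp : Prop := ∀ (slowo : String), Dom_stp slowo → Pre_stp slowo → Spec_stp slowo (stp slowo)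

-- ===== LEMMAS AND PROOFS =====

-- the two per-character steps agree
lemma pvStep_eq : pvStepA = pvStepB := by
  funext st a
  obtain ⟨tree, tab, arena⟩ := st
  by_cases hJ : a = 'J' <;> by_cases hD : a = 'D' <;> by_cases hT : a = 'T' <;>
    cases tab <;>
    simp_all [pvStepA, pvStepB, pvArity, List.replicate]

-- well-formedness: every child index is strictly above its parent and in range,
-- tab and tree indices in range, and tree none only with empty tab
def pvGood (st : Option Nat × List Nat × List (List Nat)) : Prop :=
  (∀ r, st.1 = some r → r < st.2.2.length) ∧
  (∀ x ∈ st.2.1, x < st.2.2.length) ∧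
  (∀ i, ∀ c ∈ st.2.2.getD i [], i < c ∧ c < st.2.2.length)

lemma getD_set_append (arena : List (List Nat)) (x : Nat) (v : List Nat) (i : Nat) :
    (arena.set x v ++ [[]]).getD i [] =
      if i = x ∧ x < arena.length then v
      else if i = arena.length then [] else arena.getD i [] := by
  rcases Nat.lt_trichotomy i arena.length with h | h | h
  · by_cases hx : i = x
    · subst hx
      rw [if_pos ⟨rfl, h⟩]
      simp [List.getD, List.getElem?_append_left, List.length_set, h]
    · rw [if_neg (by tauto), if_neg (by omega)]
      simp [List.getD, List.getElem?_append_left, List.length_set, h,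
        List.getElem_set_ne (by omega : x ≠ i)]
  · subst h
    rw [if_neg (by omega), if_pos rfl]
    simp [List.getD, List.length_set]
  · rw [if_neg (by omega), if_neg (by omega)]
    have h1 : (arena.set x v ++ [[]])[i]? = none := by
      rw [List.getElem?_eq_none] ; simp [List.length_set]; omega
    have h2 : arena[i]? = none := by
      rw [List.getElem?_eq_none]; omega
    simp [List.getD, h1, h2]

lemma getD_append_nil (arena : List (List Nat)) (i : Nat) :
    (arena ++ [[]]).getD i [] = arena.getD i [] := by
  rcases Nat.lt_trichotomy i arena.length with h | h | h
  · simp [List.getD, List.getElem?_append_left, h]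
  · subst h
    have h1 : (arena ++ [[]])[arena.length]? = some [] := by
      rw [List.getElem?_append_right (le_refl _)]
      simp
    have h2 : arena[arena.length]? = none := by simp
    simp [List.getD]
  · have h1 : (arena ++ [[]])[i]? = none := by
      rw [List.getElem?_eq_none]; simp; omega
    have h2 : arena[i]? = none := by rw [List.getElem?_eq_none]; omega
    simp [List.getD, h1, h2]

lemma pvGood_step (st : Option Nat × List Nat × List (List Nat)) (a : Char)
    (h : pvGood st) : pvGood (pvStepB st a) := by
  obtain ⟨tree, tab, arena⟩ := st
  obtain ⟨h1, h2, h3⟩ := h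
  simp only [pvGood] at h1 h2 h3 ⊢
  cases tab with
  | nil =>
    simp only [pvStepB]
    refine ⟨?_, ?_, ?_⟩
    · intro r hr
      simp at hr ⊢
      omega
    · intro x hx
      rcases (List.mem_replicate.mp hx).2 with rfl
      simp
    · intro i c hc
      rw [getD_append_nil] at hc
      have := h3 i c hc
      simp only [List.length_append, List.length_singleton]
      omega
  | cons x rest =>
    have hx : x < arena.length := h2 x (by simp)
    simp only [pvStepB]
    refine ⟨?_, ?_, ?_⟩
    · intro r hr
      have := h1 r hr
      simp only [List.length_append, List.length_set, List.length_singleton]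
      omega
    · intro y hy
      simp only [List.length_append, List.length_set, List.length_singleton]
      rcases List.mem_append.mp hy with hy | hy
      · rcases (List.mem_replicate.mp hy).2 with rfl; omega
      · have := h2 y (List.mem_cons_of_mem _ hy); omega
    · intro i c hc
      rw [getD_set_append] at hc
      simp only [List.length_append, List.length_set, List.length_singleton]
      split_ifs at hc with hcond hcond2
      · obtain ⟨rfl, _⟩ := hcond
        rcases List.mem_append.mp hc with hc | hc
        · have := h3 i c hc; omega
        · simp at hc; omega
      · simp at hc
      · have := h3 i c hc; omega

lemma pvGood_build (cs : List Char) (st : Option Nat × List Nat × List (List Nat))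
    (h : pvGood st) : pvGood (cs.foldl pvStepB st) := by
  induction cs generalizing st with
  | nil => exact h
  | cons c cs ih => exact ih _ (pvGood_step _ _ h)

lemma pvStepB_isSome (st : Option Nat × List Nat × List (List Nat)) (a : Char)
    (h : st.1.isSome) : (pvStepB st a).1.isSome := by
  obtain ⟨tree, tab, arena⟩ := st
  cases tab <;> simp_all [pvStepB]

lemma pvBuild_isSome (cs : List Char) (st : Option Nat × List Nat × List (List Nat))
    (h : st.1.isSome) : (cs.foldl pvStepB st).1.isSome := by
  induction cs generalizing st with
  | nil => exact h
  | cons c cs ih => exact ih _ (pvStepB_isSome _ _ h)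

lemma pvDepthA_fuel (arena : List (List Nat))
    (hwf : ∀ i, ∀ c ∈ arena.getD i [], i < c ∧ c < arena.length) :
    ∀ n i f1 f2, arena.length - i ≤ n → i < arena.length →
      arena.length - i ≤ f1 → arena.length - i ≤ f2 →
      pvDepthA arena f1 i = pvDepthA arena f2 i := by
  intro n
  induction n with
  | zero => intro i f1 f2 hn hi _ _; omega
  | succ n ih =>
    intro i f1 f2 hn hi hf1 hf2
    obtain ⟨a, rfl⟩ : ∃ a, f1 = a + 1 := ⟨f1 - 1, by omega⟩
    obtain ⟨b, rfl⟩ : ∃ b, f2 = b + 1 := ⟨f2 - 1, by omega⟩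
    simp only [pvDepthA]
    have hmap : (arena.getD i []).map (pvDepthA arena a)
        = (arena.getD i []).map (pvDepthA arena b) := by
      apply List.map_congr_left
      intro c hc
      have hcc := hwf i c hc
      exact ih c a b (by omega) hcc.2 (by omega) (by omega)
    rw [hmap]

lemma pvSize_fuel (arena : List (List Nat))
    (hwf : ∀ i, ∀ c ∈ arena.getD i [], i < c ∧ c < arena.length) :
    ∀ n i f1 f2, arena.length - i ≤ n → i < arena.length →
      arena.length - i ≤ f1 → arena.length - i ≤ f2 →
      pvSize arena f1 i = pvSize arena f2 i := by
  intro n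
  induction n with
  | zero => intro i f1 f2 hn hi _ _; omega
  | succ n ih =>
    intro i f1 f2 hn hi hf1 hf2
    obtain ⟨a, rfl⟩ : ∃ a, f1 = a + 1 := ⟨f1 - 1, by omega⟩
    obtain ⟨b, rfl⟩ : ∃ b, f2 = b + 1 := ⟨f2 - 1, by omega⟩
    simp only [pvSize]
    have hmap : (arena.getD i []).map (pvSize arena a)
        = (arena.getD i []).map (pvSize arena b) := by
      apply List.map_congr_left
      intro c hc
      have hcc := hwf i c hc
      exact ih c a b (by omega) hcc.2 (by omega) (by omega)
    rw [hmap]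

lemma le_foldl_max_int (l : List Int) : ∀ b : Int, b ≤ l.foldl max b := by
  induction l with
  | nil => intro b; simp
  | cons h t ih =>
    intro b
    exact le_trans (le_max_left b h) (ih (max b h))

lemma pvDepthA_nonneg (arena : List (List Nat)) :
    ∀ fuel i, 0 ≤ pvDepthA arena fuel i := by
  intro fuel
  induction fuel with
  | zero => intro i; simp [pvDepthA]
  | succ fuel ih =>
    intro i
    simp only [pvDepthA]
    split
    · norm_num
    · cases hm : (arena.getD i []).map (pvDepthA arena fuel) with
      | nil => simp
      | cons h t =>
        have hh : 0 ≤ h := by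
          have hmem : h ∈ (arena.getD i []).map (pvDepthA arena fuel) := by
            rw [hm]; exact List.mem_cons_self
          obtain ⟨c, _, rfl⟩ := List.mem_map.mp hmem
          exact ih c
        have := le_foldl_max_int t h
        dsimp only
        omega

lemma pvDepthA_pos (arena : List (List Nat)) (i : Nat) (hi : i < arena.length) :
    1 ≤ pvDepthA arena arena.length i := by
  obtain ⟨m, hm⟩ : ∃ m, arena.length = m + 1 := ⟨arena.length - 1, by omega⟩
  rw [hm]
  simp only [pvDepthA]
  split
  · norm_num
  · rename_i hne
    cases hmap : (arena.getD i []).map (pvDepthA arena m) with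
    | nil =>
      exfalso
      apply hne
      simpa using congrArg List.length hmap
    | cons h t =>
      have hh : 0 ≤ h := by
        have hmem : h ∈ (arena.getD i []).map (pvDepthA arena m) := by
          rw [hmap]; exact List.mem_cons_self
        obtain ⟨c, _, rfl⟩ := List.mem_map.mp hmem
        exact pvDepthA_nonneg arena m c
      have := le_foldl_max_int t h
      dsimp only
      omega

-- max-fold algebra: pulling an offset max out of a foldl, and reversal invariance
lemma foldl_max_shift {α : Type} (g : α → Int) (d : Int) :
    ∀ (t : List α) (r b : Int),
      t.foldl (fun a c => max a (d + g c)) (max r (d + b))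
        = max r (d + (t.map g).foldl max b) := by
  intro t
  induction t with
  | nil => intro r b; simp
  | cons c t ih =>
    intro r b
    simp only [List.foldl_cons, List.map_cons]
    rw [show max (max r (d + b)) (d + g c) = max r (d + max b (g c)) from by omega]
    exact ih r (max b (g c))

lemma foldl_max_swap {α : Type} (g : α → Int) :
    ∀ (l : List α) (r s : Int),
      l.foldl (fun a x => max a (g x)) (max r s) = max s (l.foldl (fun a x => max a (g x)) r) := by
  intro l
  induction l with
  | nil => intro r s; exact max_comm r s
  | cons x l ih =>
    intro r s
    simp only [List.foldl_cons]
    rw [show max (max r s) (g x) = max (max r (g x)) s from by omega]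
    exact ih (max r (g x)) s

lemma foldl_max_reverse {α : Type} (g : α → Int) :
    ∀ (l : List α) (r : Int),
      l.reverse.foldl (fun a x => max a (g x)) r = l.foldl (fun a x => max a (g x)) r := by
  intro l
  induction l with
  | nil => intro r; rfl
  | cons x l ih =>
    intro r
    simp only [List.reverse_cons, List.foldl_append, List.foldl_cons, List.foldl_nil, ih]
    rw [foldl_max_swap g l r (g x)]
    exact max_comm _ _

lemma pvSize_pos (arena : List (List Nat)) (fuel i : Nat) : 1 ≤ pvSize arena fuel i := by
  cases fuel <;> simp [pvSize]

-- the DFS loop computes the fold of levels+depths over the stack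
lemma pvDfsB_eq (arena : List (List Nat))
    (hwf : ∀ i, ∀ c ∈ arena.getD i [], i < c ∧ c < arena.length) :
    ∀ fuel stack r,
      (∀ p ∈ stack, (p : Nat × Int).1 < arena.length) →
      (stack.map (fun p => pvSize arena arena.length p.1)).sum ≤ fuel →
      pvDfsB arena fuel stack r =
        stack.foldl (fun acc p => max acc (p.2 - 1 + pvDepthA arena arena.length p.1)) r := by
  intro fuel
  induction fuel with
  | zero =>
    intro stack r hb hs
    cases stack with
    | nil => rfl
    | cons p s =>
      exfalso
      have := pvSize_pos arena arena.length p.1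
      simp only [List.map_cons, List.sum_cons] at hs
      omega
  | succ fuel ih =>
    intro stack r hb hs
    cases stack with
    | nil => rfl
    | cons p s =>
      obtain ⟨i, d⟩ := p
      have hi : i < arena.length := hb (i, d) List.mem_cons_self
      obtain ⟨m, hmN⟩ : ∃ m, arena.length = m + 1 := ⟨arena.length - 1, by omega⟩
      -- children depths with canonical fuel
      have hmapD : (arena.getD i []).map (pvDepthA arena m)
          = (arena.getD i []).map (pvDepthA arena arena.length) := by
        apply List.map_congr_left
        intro c hc
        have hcc := hwf i c hc
        exact pvDepthA_fuel arena hwf arena.length c m arena.length (by omega) hcc.2 (by omega) (by omega)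
      have hmapS : (arena.getD i []).map (pvSize arena m)
          = (arena.getD i []).map (pvSize arena arena.length) := by
        apply List.map_congr_left
        intro c hc
        have hcc := hwf i c hc
        exact pvSize_fuel arena hwf arena.length c m arena.length (by omega) hcc.2 (by omega) (by omega)
      have hsz : pvSize arena arena.length i
          = 1 + ((arena.getD i []).map (pvSize arena arena.length)).sum := by
        conv_lhs => rw [hmN]
        simp only [pvSize]
        rw [hmapS]
      simp only [pvDfsB]
      by_cases hleaf : (arena.getD i []).length = 0
      · rw [if_pos hleaf]
        have hcs : arena.getD i [] = [] := List.length_eq_zero_iff.mp hleaf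
        have hd1 : pvDepthA arena arena.length i = 1 := by
          rw [hmN]; simp only [pvDepthA]; exact if_pos hleaf
        have hs' : (s.map (fun p => pvSize arena arena.length p.1)).sum ≤ fuel := by
          simp only [List.map_cons, List.sum_cons] at hs
          have := pvSize_pos arena arena.length i
          omega
        rw [ih s (max r d) (fun p hp => hb p (List.mem_cons_of_mem _ hp)) hs']
        simp only [List.foldl_cons]
        rw [show max r (d - 1 + pvDepthA arena arena.length i) = max r d from by rw [hd1]; omega]
      · rw [if_neg hleaf]
        have hb' : ∀ p ∈ ((arena.getD i []).map fun c => (c, d + 1)).reverse ++ s,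
            (p : Nat × Int).1 < arena.length := by
          intro p hp
          rcases List.mem_append.mp hp with hp | hp
          · rw [List.mem_reverse] at hp
            obtain ⟨c, hc, rfl⟩ := List.mem_map.mp hp
            exact (hwf i c hc).2
          · exact hb p (List.mem_cons_of_mem _ hp)
        have hsum' : ((((arena.getD i []).map fun c => (c, d + 1)).reverse ++ s).map
            (fun p => pvSize arena arena.length p.1)).sum ≤ fuel := by
          simp only [List.map_append, List.sum_append, List.map_reverse, List.sum_reverse,
            List.map_map]
          simp only [List.map_cons, List.sum_cons] at hs
          rw [hsz] at hs
          have hcomp : ((arena.getD i []).map ((fun p => pvSize arena arena.length (p : Nat × Int).1) ∘ fun c => (c, d + 1)))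
              = (arena.getD i []).map (pvSize arena arena.length) := by
            apply List.map_congr_left; intro c _; rfl
          rw [hcomp]
          omega
        rw [ih _ r hb' hsum']
        rw [List.foldl_append]
        have hrev : (((arena.getD i []).map fun c => (c, d + 1)).reverse).foldl
              (fun acc p => max acc (p.2 - 1 + pvDepthA arena arena.length p.1)) r
            = (arena.getD i []).foldl (fun a c => max a (d + pvDepthA arena arena.length c)) r := by
          rw [← List.map_reverse, List.foldl_map]
          have heq : (fun (acc : Int) (c : Nat) =>
                max acc (((c, d + 1) : Nat × Int).2 - 1 + pvDepthA arena arena.length ((c, d + 1) : Nat × Int).1))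
              = fun (acc : Int) (c : Nat) => max acc (d + pvDepthA arena arena.length c) := by
            funext acc c
            norm_num
          rw [heq]
          exact foldl_max_reverse (fun c => d + pvDepthA arena arena.length c) _ r
        rw [hrev]
        have hkey : (arena.getD i []).foldl (fun a c => max a (d + pvDepthA arena arena.length c)) r
            = max r (d - 1 + pvDepthA arena arena.length i) := by
          cases hcs0 : arena.getD i [] with
          | nil => exact absurd (by rw [hcs0]; rfl) hleaf
          | cons c0 ct =>
            have hdepth : pvDepthA arena arena.length i
                = ((ct.map (pvDepthA arena arena.length)).foldl max (pvDepthA arena arena.length c0)) + 1 := by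
              conv_lhs => rw [hmN]
              simp only [pvDepthA]
              rw [if_neg hleaf]
              rw [hmapD, hcs0]
              simp only [List.map_cons]
            rw [List.foldl_cons,
              foldl_max_shift (pvDepthA arena arena.length) d ct r (pvDepthA arena arena.length c0),
              hdepth]
            omega
        rw [hkey]
        simp only [List.foldl_cons]

-- ===== VERDICT (by name: the statement is the Claim_ definition above) =====
theorem stp_spec : Claim_equal_stp := by
  unfold Claim_equal_stp
  intro s _ hpre
  unfold Spec_stp stp stp_alt
  rw [pvStep_eq]
  dsimp only
  have hs : s.toList ≠ [] := fun h => hpre (by simpa using h)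
  obtain ⟨c, cs, hcs⟩ := List.exists_cons_of_ne_nil hs
  have hsome : ((s.toList.foldl pvStepB (none, [], [])).1).isSome := by
    rw [hcs, List.foldl_cons]
    apply pvBuild_isSome
    simp [pvStepB]
  have hgood : pvGood (s.toList.foldl pvStepB (none, [], [])) :=
    pvGood_build _ _ ⟨by simp, by simp, by simp [List.getD]⟩
  obtain ⟨r, hr⟩ := Option.isSome_iff_exists.mp hsome
  obtain ⟨htree, htab, hwf⟩ := hgood
  have hrN : r < (s.toList.foldl pvStepB (none, [], [])).2.2.length := htree r hr
  rw [hr]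
  dsimp only
  have hdfs := pvDfsB_eq (s.toList.foldl pvStepB (none, [], [])).2.2 hwf
    (pvSize (s.toList.foldl pvStepB (none, [], [])).2.2
      (s.toList.foldl pvStepB (none, [], [])).2.2.length r)
    [(r, 1)] 0
    (by intro p hp; simp at hp; subst hp; exact hrN)
    (by simp)
  rw [hdfs]
  simp only [List.foldl_cons, List.foldl_nil]
  have hpos := pvDepthA_pos (s.toList.foldl pvStepB (none, [], [])).2.2 r hrN
  omega
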